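-- pv_equiv track=rewrite | github.com/GUUTA/qubee-nlp | src/qubee_nlp/utils/validation.py | _check_invalid_sequences
-- ===== SOURCE A (Python) =====
-- from typing import Dict, List, Tuple, Set, Optional, Any
--
-- def _check_invalid_sequences(word: str) -> List[str]:
--     """
--     Check for sequences that are invalid in Afaan Oromoo.
--
--     Returns:
--         List of issues
--     """
--     issues = []
--     word_upper = word.upper()
--
--     # Invalid sequences
--     invalid_sequences = [
--         'BM', 'BN', 'BP', 'BV',  # Rare/unlikely sequences
--         'DM', 'DN', 'DP', 'DV',
--         'GM', 'GN', 'GP', 'GV',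
--         'HM', 'HN', 'HP', 'HV',
--         'JM', 'JN', 'JP', 'JV',
--         'KM', 'KN', 'KP', 'KV',
--         'LM', 'LN', 'LP', 'LV',
--         'PM', 'PN', 'PP', 'PV',
--         'QM', 'QN', 'QP', 'QV',
--         'TM', 'TN', 'TP', 'TV',
--         'VM', 'VN', 'VP', 'VV',
--         'XM', 'XN', 'XP', 'XV',
--         'ZM', 'ZN', 'ZP', 'ZV',
--     ]
--
--     for seq in invalid_sequences:
--         if seq in word_upper:
--             issues.append(f"Invalid sequence '{seq}' found")
--
--     return issues
-- ===== SOURCE B (Python) =====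
-- def _check_invalid_sequences(word: str):
--     """Build the set of adjacent bigrams once, then filter the fixed
--     13x4 grid of invalid first/second letters against it."""
--     wu = word.upper()
--     bigrams = set(zip(wu, wu[1:]))
--     return [f"Invalid sequence '{a}{b}' found"
--             for a in "BDGHJKLPQTVXZ"
--             for b in "MNPV"
--             if (a, b) in bigrams]
-- ===== Notes on version B (the rewrite author's own statement) =====
-- stated objective: idiomatic
-- what changed: Instead of A's 52 separate substring scans over the word, B builds the set of adjacent bigrams of word.upper() once with zip and emits messages by filtering the fixed 13x4 letter grid against that set.
import Mathlib
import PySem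

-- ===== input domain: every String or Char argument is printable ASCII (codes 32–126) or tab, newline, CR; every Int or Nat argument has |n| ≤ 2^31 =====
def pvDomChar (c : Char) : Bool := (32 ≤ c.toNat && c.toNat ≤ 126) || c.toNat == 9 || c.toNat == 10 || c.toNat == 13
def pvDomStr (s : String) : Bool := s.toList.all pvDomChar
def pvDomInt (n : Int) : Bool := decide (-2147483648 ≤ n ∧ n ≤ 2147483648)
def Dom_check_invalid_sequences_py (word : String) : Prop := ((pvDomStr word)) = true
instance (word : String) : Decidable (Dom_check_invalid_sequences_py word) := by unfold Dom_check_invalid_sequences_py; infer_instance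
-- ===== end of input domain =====

-- B builds the set of adjacent bigrams of word.upper() once and filters the fixed 13x4
-- letter grid against it, instead of A's 52 separate substring scans (objective: idiomatic).


-- ===== PORT A =====
-- A's literal list of invalid sequences, in A's order.
def pvInvalidSeqs : List String :=
  ["BM", "BN", "BP", "BV",
   "DM", "DN", "DP", "DV",
   "GM", "GN", "GP", "GV",
   "HM", "HN", "HP", "HV",
   "JM", "JN", "JP", "JV",
   "KM", "KN", "KP", "KV",
   "LM", "LN", "LP", "LV",
   "PM", "PN", "PP", "PV",
   "QM", "QN", "QP", "QV",
   "TM", "TN", "TP", "TV",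
   "VM", "VN", "VP", "VV",
   "XM", "XN", "XP", "XV",
   "ZM", "ZN", "ZP", "ZV"]

def check_invalid_sequences_py (word : String) : List String :=
  let word_upper := PySem.Str.upper word
  pvInvalidSeqs.foldl
    (fun issues seq =>
      if PySem.Str.isIn seq word_upper then
        issues ++ ["Invalid sequence '" ++ seq ++ "' found"]
      else issues)
    []

-- ===== PORT B =====
def check_invalid_sequences_py_alt (word : String) : List String :=
  let wu := PySem.Str.upper word
  -- bigrams = set(zip(wu, wu[1:]))
  let bigrams : PySem.Set (Char × Char) :=
    PySem.Set.ofList (wu.toList.zip (PySem.List.slice wu.toList (some 1) none))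
  "BDGHJKLPQTVXZ".toList.flatMap (fun a =>
    ("MNPV".toList.filter (fun b => PySem.Set.contains bigrams (a, b))).map
      (fun b => "Invalid sequence '" ++ String.ofList [a, b] ++ "' found"))

-- ===== PRECONDITION & SPEC =====
def Spec_check_invalid_sequences_py (word : String) (out : List String) : Prop := out = check_invalid_sequences_py_alt word
instance (word : String) (out : List String) : Decidable (Spec_check_invalid_sequences_py word out) := by unfold Spec_check_invalid_sequences_py; infer_instance

-- ===== CLAIM (what is proved, stated in full; the proofs are below) =====
def Claim_equal_check_invalid_sequences_py : Prop := ∀ (word : String), Dom_check_invalid_sequences_py word → Spec_check_invalid_sequences_py word (check_invalid_sequences_py word)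

-- ===== LEMMAS AND PROOFS =====

-- A length-2 substring occurs in l iff its character pair is an adjacent bigram of l.
lemma infix_pair_iff (a b : Char) (l : List Char) :
    [a, b] <:+: l ↔ (a, b) ∈ l.zip l.tail := by
  induction l with
  | nil => simp
  | cons x xs ih =>
    rw [List.infix_cons_iff]
    cases xs with
    | nil =>
      constructor
      · rintro (h | h)
        · exact absurd (List.IsPrefix.length_le h) (by simp)
        · exact absurd (List.Sublist.length_le h.sublist) (by simp)
      · simp
    | cons y ys =>
      rw [List.tail_cons, List.zip_cons_cons, List.mem_cons]
      constructor
      · rintro (h | h)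
        · rcases List.cons_prefix_cons.mp h with ⟨rfl, h2⟩
          rcases List.cons_prefix_cons.mp h2 with ⟨rfl, _⟩
          exact Or.inl rfl
        · exact Or.inr (by simpa using ih.mp h)
      · rintro (h | h)
        · rw [Prod.mk.injEq] at h
          rcases h with ⟨rfl, rfl⟩
          exact Or.inl (by simp)
        · exact Or.inr (ih.mpr (by simpa using h))

lemma isIn_pair (a b : Char) (l : List Char) :
    PySem.Chars.isIn [a, b] l = decide ((a, b) ∈ l.zip l.tail) := by
  rcases h : PySem.Chars.isIn [a, b] l with _ | _
  · have := (PySem.Chars.isIn_eq_false_iff _ _).mp h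
    simp [(infix_pair_iff a b l).not.mp this]
  · have := (PySem.Chars.isIn_iff_infix _ _).mp h
    simp [(infix_pair_iff a b l).mp this]

-- the 52-element literal list is exactly the 13x4 grid of two-letter strings
lemma seqs_eq_grid :
    pvInvalidSeqs =
      "BDGHJKLPQTVXZ".toList.flatMap (fun a => "MNPV".toList.map (fun b => String.ofList [a, b])) := by
  decide

-- ===== VERDICT (by name: the statement is the Claim_ definition above) =====
theorem check_invalid_sequences_py_spec : Claim_equal_check_invalid_sequences_py := by
  intro word _
  unfold Spec_check_invalid_sequences_py check_invalid_sequences_py check_invalid_sequences_py_alt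
  rw [PySem.List.foldl_append_if, seqs_eq_grid, List.nil_append,
      List.filter_flatMap, List.map_flatMap]
  refine List.flatMap_congr ?_
  intro a _
  rw [List.filter_map, List.map_map]
  refine congrArg _ (List.filter_congr ?_)
  intro b _
  simp only [Function.comp_apply, PySem.Str.isIn_eq, PySem.List.slice_from_one,
    PySem.Set.contains_eq_listContains]
  rw [show (String.ofList [a, b]).toList = [a, b] by simp, isIn_pair]
  simp [PySem.Set.mem_ofList]
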